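-- pv_equiv track=rewrite | github.com/jonasort/MEA_analysis | Henners_select/03_isi_bursts_and_graph_connections_to_pickle.py | bin_isi
-- ===== SOURCE A (Python) =====
-- def create_bins(lower_bound, width, quantity):
--     """ create_bins returns an equal-width (distance) partitioning.
--         It returns an ascending list of tuples, representing the intervals.
--         A tuple bins[i], i.e. (bins[i][0], bins[i][1])  with i > 0
--         and i < quantity, satisfies the following conditions:
--             (1) bins[i][0] + width == bins[i][1]
--             (2) bins[i-1][0] + width == bins[i][0] and
--                 bins[i-1][1] + width == bins[i][1]
--     """
--
--
--     bins = []
--     for low in range(lower_bound,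
--                      lower_bound + quantity*width + 1, width):
--         bins.append((low, low+width))
--     return bins
--
-- def bin_isi(isi_alone_dic, binsize, binmax=bool, binmaxnumber=None):
--     '''
--
--     Parameters
--     ----------
--     isi_alone_dic : dic
--         dictionary with all ISI for every channel
--     binsize: int
--         expects int in microseconds that defines bin-width
--     Returns
--     -------
--     histo_ISI_dic:
--         dic with key:channellabel, value: list with bincounts per bin
--
--     '''
--     isi_bins = []
--     isi_bins_list = []
--     isi_bin_count = []
--     histo_ISI_dic = {}
--     for key in isi_alone_dic:
--         if binmax==True:
--             isi_bin_count=[]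
--             isibins=create_bins(0, binsize, binmaxnumber)
--             isi_bins_list=[]
--             for i in range(0, len(isibins)):
--                 isi_bins=[]
--                 for a in isi_alone_dic[key]:
--                     if isibins[i][0] <= a < isibins[i][1]:
--                         isi_bins.append(a)
--                 isi_bins_list.append(isi_bins)
--             for i in range(0, (len(isi_bins_list)-1)):
--                 isi_bin_count.append(len(isi_bins_list[i]))
--             histo_ISI_dic[key]=isi_bin_count
--         #else:
--             # noch schreiben für variable maximalnummer an bins
--
--     return histo_ISI_dic
-- ===== SOURCE B (Python) =====
-- def bin_isi(isi_alone_dic, binsize, binmax=bool, binmaxnumber=None):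
--     '''One pass per channel: each ISI value is placed directly in bin a // binsize,
--     instead of rescanning the whole value list once for every bin.'''
--     histo_ISI_dic = {}
--     if binmax == True:
--         for key, values in isi_alone_dic.items():
--             counts = [0] * binmaxnumber
--             for a in values:
--                 if 0 <= a < binmaxnumber * binsize:
--                     counts[a // binsize] += 1
--             histo_ISI_dic[key] = counts
--     return histo_ISI_dic
-- ===== Notes on version B (the rewrite author's own statement) =====
-- stated objective: faster
-- what changed: A scans the whole value list once per bin (building a list per bin, then taking lengths); B makes a single pass over the values, incrementing counts[a // binsize] in a preallocated counts array; Pre_ excludes duplicate keys (the argument stands for a dict) and non-positive binsize with binmax=True, where A's range-stepping bin construction either raises (binsize=0) or yields an accidental bin list for a meaningless negative bin width.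
-- outside the precondition, e.g. on bin_isi({'a': [1]}, -3, True, 2): A returns {'a': [0]}, B returns {'a': [0, 0]}; on bin_isi({'a': [1]}, 0, True, 2): A raises ValueError, B returns {'a': [0, 0]}
import Mathlib
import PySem

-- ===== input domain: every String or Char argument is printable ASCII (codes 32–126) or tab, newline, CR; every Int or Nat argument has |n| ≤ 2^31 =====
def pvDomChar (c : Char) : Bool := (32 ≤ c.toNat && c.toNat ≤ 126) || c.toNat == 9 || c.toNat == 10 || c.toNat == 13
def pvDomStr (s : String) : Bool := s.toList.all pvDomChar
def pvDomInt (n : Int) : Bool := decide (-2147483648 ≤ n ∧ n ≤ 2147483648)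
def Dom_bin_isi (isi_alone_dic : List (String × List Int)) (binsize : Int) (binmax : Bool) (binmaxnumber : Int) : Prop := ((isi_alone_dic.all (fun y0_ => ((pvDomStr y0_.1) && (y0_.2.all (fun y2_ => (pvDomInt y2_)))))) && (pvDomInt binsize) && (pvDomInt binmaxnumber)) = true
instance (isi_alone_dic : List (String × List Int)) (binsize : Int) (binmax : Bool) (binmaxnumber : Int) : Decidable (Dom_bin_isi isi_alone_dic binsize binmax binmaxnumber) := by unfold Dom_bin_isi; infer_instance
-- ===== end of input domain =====

-- B replaces A's scan of every value for every bin by a single pass placing each value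
-- at bin index a // binsize (objective: faster, O(n + bins) instead of O(n * bins) per channel).

-- ===== PORT A =====
-- create_bins(lower_bound, width, quantity)
def pvCreateBins (lower_bound width quantity : Int) : List (Int × Int) :=
  (PySem.List.pyRange lower_bound (lower_bound + quantity * width + 1) width).map
    (fun low => (low, low + width))

-- the body of A's per-key work: isibins / isi_bins_list / isi_bin_count
def pvABinCount (binsize binmaxnumber : Int) (vals : List Int) : List Int :=
  let isibins := pvCreateBins 0 binsize binmaxnumber
  let isi_bins_list := (PySem.List.pyRange 0 ((isibins.length : Int)) 1).foldl
    (fun acc i =>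
      acc ++ [vals.foldl
        (fun bs a =>
          if (PySem.List.pyGetD isibins i (0, 0)).1 ≤ a ∧ a < (PySem.List.pyGetD isibins i (0, 0)).2
          then bs ++ [a] else bs) []]) []
  (PySem.List.pyRange 0 ((isi_bins_list.length : Int) - 1) 1).foldl
    (fun acc i => acc ++ [((PySem.List.pyGetD isi_bins_list i []).length : Int)]) []

def bin_isi (isi_alone_dic : List (String × List Int)) (binsize : Int) (binmax : Bool) (binmaxnumber : Int) : List (String × List Int) :=
  (isi_alone_dic.foldl
    (fun (h : PySem.Dict String (List Int)) kv =>
      if binmax = true then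
        h.insert kv.1 (pvABinCount binsize binmaxnumber ((PySem.Dict.mk isi_alone_dic).getD kv.1 []))
      else h)
    PySem.Dict.empty).items

-- ===== PORT B =====
-- single pass: counts = [0]*binmaxnumber; counts[a // binsize] += 1 for a in range
def pvBBinCount (binsize binmaxnumber : Int) (vals : List Int) : List Int :=
  vals.foldl
    (fun c a =>
      if 0 ≤ a ∧ a < binmaxnumber * binsize then
        PySem.List.pySetD c (PySem.Int.floordiv a binsize)
          (PySem.List.pyGetD c (PySem.Int.floordiv a binsize) 0 + 1)
      else c)
    (List.replicate binmaxnumber.toNat 0)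

def bin_isi_alt (isi_alone_dic : List (String × List Int)) (binsize : Int) (binmax : Bool) (binmaxnumber : Int) : List (String × List Int) :=
  if binmax = true then
    (isi_alone_dic.foldl
      (fun (h : PySem.Dict String (List Int)) kv =>
        h.insert kv.1 (pvBBinCount binsize binmaxnumber kv.2))
      PySem.Dict.empty).items
  else []

-- ===== PRECONDITION & SPEC =====
-- Pre_ excludes (a) association lists with duplicate keys — the argument represents a
-- Python dict, which cannot hold them — and (b) non-positive binsize with binmax = True:
-- there A's range-stepping bin construction raises ValueError (binsize = 0, non-empty dict)
-- or produces an accidental bin list for a meaningless negative bin width.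
def Pre_bin_isi (isi_alone_dic : List (String × List Int)) (binsize : Int) (binmax : Bool) (binmaxnumber : Int) : Prop :=
  (isi_alone_dic.map Prod.fst).Nodup ∧ (binmax = true → 0 < binsize)
instance (isi_alone_dic : List (String × List Int)) (binsize : Int) (binmax : Bool) (binmaxnumber : Int) : Decidable (Pre_bin_isi isi_alone_dic binsize binmax binmaxnumber) := by unfold Pre_bin_isi; infer_instance

def pvWitness_bin_isi : (List (String × List Int)) × Int × Bool × Int :=
  ([("A1", [0, 3, 5, 5, 11]), ("B2", [-2, 7])], 3, true, 4)

def Spec_bin_isi (isi_alone_dic : List (String × List Int)) (binsize : Int) (binmax : Bool) (binmaxnumber : Int) (out : List (String × List Int)) : Prop := out = bin_isi_alt isi_alone_dic binsize binmax binmaxnumber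
instance (isi_alone_dic : List (String × List Int)) (binsize : Int) (binmax : Bool) (binmaxnumber : Int) (out : List (String × List Int)) : Decidable (Spec_bin_isi isi_alone_dic binsize binmax binmaxnumber out) := by unfold Spec_bin_isi; infer_instance

-- ===== CLAIM (what is proved, stated in full; the proofs are below) =====
def Claim_equal_bin_isi : Prop := ∀ (isi_alone_dic : List (String × List Int)) (binsize : Int) (binmax : Bool) (binmaxnumber : Int), Dom_bin_isi isi_alone_dic binsize binmax binmaxnumber → Pre_bin_isi isi_alone_dic binsize binmax binmaxnumber → Spec_bin_isi isi_alone_dic binsize binmax binmaxnumber (bin_isi isi_alone_dic binsize binmax binmaxnumber)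


-- ===== LEMMAS AND PROOFS =====

-- the histogram of p over bins [k*w, (k+1)*w), k = 0 .. N-1
def pvHist (w : Int) (N : Nat) (p : List Int) : List Int :=
  (List.range N).map
    (fun (k : Nat) => ((p.filter (fun a => decide ((k : Int) * w ≤ a ∧ a < ((k : Int) + 1) * w))).length : Int))

lemma pvHist_nil (w : Int) (N : Nat) : pvHist w N [] = List.replicate N 0 := by
  simp [pvHist, List.map_const']

lemma pvSet_map_range (f : Nat → Int) (N j : Nat) (_hj : j < N) (v : Int) :
    ((List.range N).map f).set j v = (List.range N).map (fun k => if j = k then v else f k) := by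
  apply List.ext_getElem
  · simp
  · intro i h1 h2
    simp_all [List.getElem_set]

-- one step of B's loop advances the histogram by one value
lemma pvStep (w : Int) (hw : 0 < w) (N : Nat) (p : List Int) (a : Int) :
    (if 0 ≤ a ∧ a < (N : Int) * w then
        PySem.List.pySetD (pvHist w N p) (PySem.Int.floordiv a w)
          (PySem.List.pyGetD (pvHist w N p) (PySem.Int.floordiv a w) 0 + 1)
      else pvHist w N p) = pvHist w N (p ++ [a]) := by
  have hfilt : ∀ (k : Nat),
      (p ++ [a]).filter (fun x => decide ((k : Int) * w ≤ x ∧ x < ((k : Int) + 1) * w))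
        = p.filter (fun x => decide ((k : Int) * w ≤ x ∧ x < ((k : Int) + 1) * w))
          ++ if (k : Int) * w ≤ a ∧ a < ((k : Int) + 1) * w then [a] else [] := by
    intro k
    rw [List.filter_append]
    by_cases hc : (k : Int) * w ≤ a ∧ a < ((k : Int) + 1) * w
    · simp [hc]
    · simp only [List.filter_cons, List.filter_nil]
      rw [if_neg hc]
      simp only [decide_eq_true_eq]
      rcases Decidable.not_and_iff_not_or_not.mp hc with h1 | h1 <;> simp [h1]
  by_cases h : 0 ≤ a ∧ a < (N : Int) * w
  · rw [if_pos h]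
    obtain ⟨ha0, haN⟩ := h
    have hj0 : 0 ≤ PySem.Int.floordiv a w := by
      rw [PySem.Int.floordiv_eq_ediv_of_pos hw]
      exact Int.ediv_nonneg ha0 (le_of_lt hw)
    have hjN : PySem.Int.floordiv a w < (N : Int) :=
      (PySem.Int.floordiv_lt_iff_lt_mul hw).mpr haN
    set j : Nat := (PySem.Int.floordiv a w).toNat with hjdef
    have hjcast : PySem.Int.floordiv a w = (j : Int) := by omega
    have hjlt : j < N := by omega
    rw [hjcast, PySem.List.pySetD_of_nonneg _ _ (by omega), PySem.List.pyGetD_natCast]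
    simp only [Int.toNat_natCast]
    unfold pvHist
    rw [List.getD_eq_getElem _ _ (by simpa using hjlt)]
    rw [pvSet_map_range _ N j hjlt]
    apply List.ext_getElem
    · simp
    · intro i h1 h2
      simp only [List.getElem_map, List.getElem_range] at *
      have hiN : i < N := by simpa using h1
      rw [hfilt i]
      by_cases hij : j = i
      · subst hij
        have hcond : (j : Int) * w ≤ a ∧ a < ((j : Int) + 1) * w := by
          have := (PySem.Int.floordiv_eq_iff_of_pos hw (q := (j : Int))).mp hjcast
          exact this
        rw [if_pos rfl, if_pos hcond]
        simp
      · have hcond : ¬ ((i : Int) * w ≤ a ∧ a < ((i : Int) + 1) * w) := by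
          intro hc
          have : PySem.Int.floordiv a w = (i : Int) :=
            (PySem.Int.floordiv_eq_iff_of_pos hw).mpr hc
          omega
        rw [if_neg hij, if_neg hcond]
        simp
  · rw [if_neg h]
    unfold pvHist
    apply List.map_congr_left
    intro k hk
    have hkN : k < N := List.mem_range.mp hk
    rw [hfilt k]
    have hcond : ¬ ((k : Int) * w ≤ a ∧ a < ((k : Int) + 1) * w) := by
      intro hc
      apply h
      constructor
      · have : (0 : Int) ≤ (k : Int) * w := mul_nonneg (by positivity) (le_of_lt hw)
        linarith [hc.1]
      · have hkN' : (k : Int) + 1 ≤ (N : Int) := by exact_mod_cast hkN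
        have : ((k : Int) + 1) * w ≤ (N : Int) * w :=
          mul_le_mul_of_nonneg_right hkN' (le_of_lt hw)
        linarith [hc.2]
    rw [if_neg hcond]
    simp

-- B's loop, run from the histogram of p, ends in the histogram of p ++ vals
lemma pvFoldB (w : Int) (hw : 0 < w) (N : Nat) (vals : List Int) (p : List Int) :
    vals.foldl
      (fun c a =>
        if 0 ≤ a ∧ a < (N : Int) * w then
          PySem.List.pySetD c (PySem.Int.floordiv a w)
            (PySem.List.pyGetD c (PySem.Int.floordiv a w) 0 + 1)
        else c) (pvHist w N p) = pvHist w N (p ++ vals) := by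
  induction vals generalizing p with
  | nil => simp
  | cons a vs ih =>
    simp only [List.foldl_cons]
    rw [pvStep w hw N p a, ih (p ++ [a])]
    simp

-- if the bound is non-positive, B's loop is the identity
lemma pvFoldB_id (w m : Int) (h : m * w ≤ 0) (vals : List Int) (c0 : List Int) :
    vals.foldl
      (fun c a =>
        if 0 ≤ a ∧ a < m * w then
          PySem.List.pySetD c (PySem.Int.floordiv a w)
            (PySem.List.pyGetD c (PySem.Int.floordiv a w) 0 + 1)
        else c) c0 = c0 := by
  induction vals generalizing c0 with
  | nil => rfl
  | cons a vs ih =>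
    simp only [List.foldl_cons]
    rw [if_neg (by intro hc; rcases hc with ⟨h1, h2⟩; omega), ih]

-- A's per-key computation, written as a map over bin indices
lemma pvABinCount_eq (w q : Int) (vals : List Int) :
    pvABinCount w q vals =
      (List.range ((((PySem.List.pyRange 0 (0 + q * w + 1) w).length : Int) - 1).toNat)).map
        (fun k =>
          ((vals.filter (fun a =>
              decide ((PySem.List.pyRange 0 (0 + q * w + 1) w).getD k 0 ≤ a ∧
                      a < (PySem.List.pyRange 0 (0 + q * w + 1) w).getD k 0 + w))).length : Int)) := by
  unfold pvABinCount pvCreateBins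
  simp only [PySem.List.foldl_append_singleton_eq_map, List.nil_append,
    PySem.List.foldl_append_ite_eq_filter]
  set L := PySem.List.pyRange 0 (0 + q * w + 1) w with hL
  set F : Int → List Int := fun i =>
    vals.filter (fun a =>
      decide ((PySem.List.pyGetD (L.map (fun low => (low, low + w))) i (0, 0)).1 ≤ a ∧
              a < (PySem.List.pyGetD (L.map (fun low => (low, low + w))) i (0, 0)).2)) with hF
  have hlen : ((PySem.List.pyRange 0 ((L.map (fun low => (low, low + w))).length : Int) 1).map F).length
      = L.length := by
    simp [PySem.List.length_pyRange_one]
  rw [hlen]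
  rw [PySem.List.pyRange_zero ((L.length : Int) - 1), List.map_map]
  apply List.map_congr_left
  intro k hk
  have hkN : k < (((L.length : Int) - 1)).toNat := List.mem_range.mp hk
  have hkL : k < L.length := by omega
  have hgd : PySem.List.pyGetD ((PySem.List.pyRange 0 ((L.map (fun low => (low, low + w))).length : Int) 1).map F) (k : Int) [] = F (k : Int) := by
    apply PySem.List.pyGetD_map_pyRange_of_nonneg F _ _ _ (by positivity)
    simp only [List.length_map]
    exact_mod_cast hkL
  simp only [Function.comp]
  rw [hgd, hF]
  congr 1
  have hbin : PySem.List.pyGetD (L.map (fun low => (low, low + w))) (k : Int) (0, 0)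
      = (L[k], L[k] + w) := by
    rw [PySem.List.pyGetD_natCast, List.getD_eq_getElem _ _ (by simpa using hkL)]
    simp
  have hLg : L.getD k 0 = L[k] := List.getD_eq_getElem _ _ hkL
  simp only [hbin, hLg]

-- for a positive width, the range underlying create_bins has exactly q+1 elements,
-- and its k-th element is w*k
lemma pvRange_len (w q : Int) (hw : 0 < w) :
    (PySem.List.pyRange 0 (0 + q * w + 1) w).length = (q + 1).toNat ∧
    (∀ (k : Nat), (h : k < (PySem.List.pyRange 0 (0 + q * w + 1) w).length) →
      (PySem.List.pyRange 0 (0 + q * w + 1) w)[k] = w * k) := by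
  have hrw : PySem.List.pyRange 0 (0 + q * w + 1) w
      = (List.range (if (0 : Int) < 0 + q * w + 1 then ((0 + q * w + 1 - 0 + w - 1) / w).toNat else 0)).map
          (fun (k : Nat) => 0 + w * (k : Int)) :=
    PySem.List.pyRange_of_pos _ _ hw
  have harg : 0 + q * w + 1 - 0 + w - 1 = (q + 1) * w := by ring
  by_cases hq : 0 ≤ q
  · have hpos : (0 : Int) < 0 + q * w + 1 := by
      have : 0 ≤ q * w := mul_nonneg hq (le_of_lt hw); omega
    have hdiv : (q + 1) * w / w = q + 1 := Int.mul_ediv_cancel _ (ne_of_gt hw)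
    constructor
    · rw [hrw, if_pos hpos]
      simp only [List.length_map, List.length_range]
      rw [harg, hdiv]
    · intro k h
      simp only [hrw, List.getElem_map, List.getElem_range]
      ring
  · have hneg : ¬ ((0 : Int) < 0 + q * w + 1) := by
      intro hc
      have h1 : q ≤ -1 := by omega
      have : q * w ≤ (-1) * w := mul_le_mul_of_nonneg_right h1 (le_of_lt hw)
      omega
    constructor
    · rw [hrw, if_neg hneg]
      simp only [List.range_zero, List.map_nil, List.length_nil]
      omega
    · intro k h
      simp only [hrw, List.getElem_map, List.getElem_range]
      ring

-- per-key agreement of the two ports for a positive bin width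
lemma pvBinCount_eq (w q : Int) (hw : 0 < w) (vals : List Int) :
    pvABinCount w q vals = pvBBinCount w q vals := by
  rw [pvABinCount_eq w q vals]
  unfold pvBBinCount
  set L := PySem.List.pyRange 0 (0 + q * w + 1) w with hL
  obtain ⟨hlen, hLk⟩ := pvRange_len w q hw
  by_cases hq : 0 ≤ q
  · -- q ≥ 0: both sides are the histogram with q.toNat bins
    have hN : (((L.length : Int)) - 1).toNat = q.toNat := by
      rw [← hL] at hlen; rw [hlen]; omega
    have hqcast : ((q.toNat : Nat) : Int) = q := Int.toNat_of_nonneg hq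
    have hfun : (fun (c : List Int) (a : Int) =>
          if 0 ≤ a ∧ a < q * w then
            PySem.List.pySetD c (PySem.Int.floordiv a w)
              (PySem.List.pyGetD c (PySem.Int.floordiv a w) 0 + 1)
          else c)
        = (fun (c : List Int) (a : Int) =>
          if 0 ≤ a ∧ a < ((q.toNat : Nat) : Int) * w then
            PySem.List.pySetD c (PySem.Int.floordiv a w)
              (PySem.List.pyGetD c (PySem.Int.floordiv a w) 0 + 1)
          else c) := by
      funext c a; rw [hqcast]
    have hBrw : vals.foldl
        (fun c a =>
          if 0 ≤ a ∧ a < q * w then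
            PySem.List.pySetD c (PySem.Int.floordiv a w)
              (PySem.List.pyGetD c (PySem.Int.floordiv a w) 0 + 1)
          else c) (List.replicate q.toNat 0)
        = pvHist w q.toNat vals := by
      rw [show List.replicate q.toNat (0 : Int) = pvHist w q.toNat [] from (pvHist_nil w q.toNat).symm]
      rw [hfun, pvFoldB w hw q.toNat vals []]
      simp
    rw [hBrw, hN]
    unfold pvHist
    apply List.map_congr_left
    intro k hk
    have hks : k < q.toNat := List.mem_range.mp hk
    have hkL : k < L.length := by rw [← hL] at hlen; omega
    have h1 : L.getD k 0 = w * k := by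
      rw [List.getD_eq_getElem _ _ hkL, hLk k hkL]
    rw [h1, show w * (k : Int) = (k : Int) * w from mul_comm w k,
      show (k : Int) * w + w = ((k : Int) + 1) * w by ring]
  · -- q < 0: both sides are []
    have hL0 : L.length = 0 := by rw [← hL] at hlen; omega
    have hqw : q * w ≤ 0 := by
      have h1 : q ≤ -1 := by omega
      have : q * w ≤ (-1) * w := mul_le_mul_of_nonneg_right h1 (le_of_lt hw)
      omega
    rw [pvFoldB_id w q hqw]
    rw [hL0]
    simp [show q.toNat = 0 by omega]

-- ===== VERDICT (by name: the statement is the Claim_ definition above) =====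
theorem bin_isi_spec : Claim_equal_bin_isi := by
  unfold Claim_equal_bin_isi
  intro dic w bmax q _hdom hpre
  unfold Spec_bin_isi
  obtain ⟨hnd, himp⟩ := hpre
  cases bmax with
  | false =>
    unfold bin_isi bin_isi_alt
    simp
    rfl
  | true =>
    have hw : 0 < w := himp rfl
    unfold bin_isi bin_isi_alt
    congr 1
    apply PySem.List.foldl_congr_mem
    intro acc kv hkv
    have hvals : (PySem.Dict.mk dic).getD kv.1 [] = kv.2 := by
      apply PySem.Dict.getD_of_mem_items _ (by exact hkv) (by simpa using hnd)
    simp [hvals, pvBinCount_eq w q hw kv.2]
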